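-- pv_equiv track=rewrite | github.com/muuty/problem-solving | programmers/weekly_challanges/3.py | rotate_and_check
-- ===== SOURCE A (Python) =====
-- def arrange_block(block):
--     block.sort(key=lambda x: x[1])
--     block.sort(key=lambda x: x[0])
--     return [[pos[0] - block[0][0], pos[1] - block[0][1]] for pos in block]
--
-- def rotate(point):
--     return [point[1], -point[0]]
--
-- def is_same(block1, block2):
--     for i in range(len(block1)):
--         if block1[i][0] != block2[i][0] or block1[i][1] != block2[i][1]:
--             return False
--     return True
--
-- def rotate_and_check(block1, block2):
--     if len(block1) != len(block2):
--         return False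
--     block1 = arrange_block(block1)
--     block2 = arrange_block(block2)
--     for i in range(0, 4):
--         if is_same(block1, block2):
--             return True
--         block2 = arrange_block([rotate(point) for point in block2])
--     return False
-- ===== SOURCE B (Python) =====
-- def _canon(block):
--     pts = [(p[0], p[1]) for p in block]
--     best = None
--     for _ in range(4):
--         pts.sort()
--         ox, oy = pts[0] if pts else (0, 0)
--         norm = [(x - ox, y - oy) for (x, y) in pts]
--         if best is None or norm < best:
--             best = norm
--         pts = [(y, -x) for (x, y) in pts]
--     return best
--
--
-- def rotate_and_check(block1, block2):
--     if len(block1) != len(block2):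
--         return False
--     return _canon(block1) == _canon(block2)
-- ===== Notes on version B (the rewrite author's own statement) =====
-- stated objective: alternative
-- what changed: B reduces each block independently to a canonical key (the lexicographically smallest of the four normalized rotations, each normalized by sorting and translating the minimal point to the origin) and compares the two keys for equality, instead of A's loop that repeatedly rotates and re-arranges block2 and compares it element-wise against block1; B also does not mutate its arguments while A sorts both in place.
import Mathlib
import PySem

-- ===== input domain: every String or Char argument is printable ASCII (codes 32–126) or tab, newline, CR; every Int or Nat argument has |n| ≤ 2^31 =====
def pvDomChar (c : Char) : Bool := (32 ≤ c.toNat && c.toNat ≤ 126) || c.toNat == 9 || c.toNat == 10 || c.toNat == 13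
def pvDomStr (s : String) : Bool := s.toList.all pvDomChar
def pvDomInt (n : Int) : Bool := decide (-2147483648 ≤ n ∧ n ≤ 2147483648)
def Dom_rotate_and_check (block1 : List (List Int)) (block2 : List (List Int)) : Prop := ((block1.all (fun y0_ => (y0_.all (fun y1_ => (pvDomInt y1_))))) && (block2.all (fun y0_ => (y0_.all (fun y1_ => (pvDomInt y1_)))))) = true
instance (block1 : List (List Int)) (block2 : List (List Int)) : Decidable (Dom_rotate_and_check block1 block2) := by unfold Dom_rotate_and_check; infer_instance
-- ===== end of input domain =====

-- B replaces A's rotate-arrange-and-compare loop by building one canonical key per block and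
-- comparing the two keys (alternative decomposition, similar cost). Python A sorts its list
-- arguments in place (observable by the caller); B does not mutate them — the equivalence
-- proved here is about the RETURN value only.

-- ===== PORT A =====
-- p[0] and p[1] as used by A's sort keys and comprehensions (Pre_ keeps both indices in range)
def pvKey0 (p : List Int) : Int := PySem.List.pyGetD p 0 0
def pvKey1 (p : List Int) : Int := PySem.List.pyGetD p 1 0

def arrange_block (block : List (List Int)) : List (List Int) :=
  let b := PySem.List.sorted (PySem.List.sorted block pvKey1) pvKey0
  b.map (fun pos => [pvKey0 pos - pvKey0 (b.headD []), pvKey1 pos - pvKey1 (b.headD [])])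

def rotateA (point : List Int) : List Int := [pvKey1 point, -(pvKey0 point)]

def is_same (block1 block2 : List (List Int)) : Bool :=
  (PySem.List.pyRange 0 (PySem.List.len block1) 1).all (fun i =>
    !(pvKey0 (PySem.List.pyGetD block1 i []) != pvKey0 (PySem.List.pyGetD block2 i []) ||
      pvKey1 (PySem.List.pyGetD block1 i []) != pvKey1 (PySem.List.pyGetD block2 i [])))

def rotate_and_check_loop (b1 : List (List Int)) : Nat → List (List Int) → Bool
  | 0, _ => false
  | k + 1, b2 =>
    if is_same b1 b2 then true
    else rotate_and_check_loop b1 k (arrange_block (b2.map rotateA))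

def rotate_and_check (block1 : List (List Int)) (block2 : List (List Int)) : Bool :=
  if block1.length ≠ block2.length then false
  else rotate_and_check_loop (arrange_block block1) 4 (arrange_block block2)

-- ===== PORT B =====
-- Python's '<' on two lists of int pairs, ported by hand (exact for such lists)
def pvPairLt (a b : Int × Int) : Bool := a.1 < b.1 || (a.1 == b.1 && a.2 < b.2)

def pvListLt : List (Int × Int) → List (Int × Int) → Bool
  | [], [] => false
  | [], _ :: _ => true
  | _ :: _, [] => false
  | a :: as, b :: bs => if a = b then pvListLt as bs else pvPairLt a b

def pvCanonLoop : Nat → List (Int × Int) → Option (List (Int × Int)) → Option (List (Int × Int))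
  | 0, _, best => best
  | k + 1, pts, best =>
    let s := PySem.List.sorted2 pts Prod.fst Prod.snd
    let o := s.headD (0, 0)   -- 'pts[0] if pts else (0, 0)' in Source B
    let norm := s.map (fun q => (q.1 - o.1, q.2 - o.2))
    let best' := match best with
      | none => some norm
      | some bst => if pvListLt norm bst then some norm else some bst
    pvCanonLoop k (s.map (fun q => (q.2, -q.1))) best'

def pvCanon (block : List (List Int)) : Option (List (Int × Int)) :=
  pvCanonLoop 4 (block.map (fun p => (PySem.List.pyGetD p 0 0, PySem.List.pyGetD p 1 0))) none

def rotate_and_check_alt (block1 : List (List Int)) (block2 : List (List Int)) : Bool :=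
  if block1.length ≠ block2.length then false
  else pvCanon block1 == pvCanon block2

-- ===== PRECONDITION & SPEC =====
-- Pre_ excludes only the inputs on which Python A itself raises IndexError: equal-length blocks
-- containing a point with fewer than two coordinates (A's sort key indexes p[1]).
def Pre_rotate_and_check (block1 : List (List Int)) (block2 : List (List Int)) : Prop :=
  block1.length ≠ block2.length ∨
    ((∀ p ∈ block1, 2 ≤ p.length) ∧ (∀ p ∈ block2, 2 ≤ p.length))
instance (block1 : List (List Int)) (block2 : List (List Int)) : Decidable (Pre_rotate_and_check block1 block2) := by unfold Pre_rotate_and_check; infer_instance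

def pvWitness_rotate_and_check : List (List Int) × List (List Int) :=
  ([[0, 0], [1, 0]], [[3, 4], [3, 5]])

def Spec_rotate_and_check (block1 : List (List Int)) (block2 : List (List Int)) (out : Bool) : Prop := out = rotate_and_check_alt block1 block2
instance (block1 : List (List Int)) (block2 : List (List Int)) (out : Bool) : Decidable (Spec_rotate_and_check block1 block2 out) := by unfold Spec_rotate_and_check; infer_instance

-- ===== CLAIM (what is proved, stated in full; the proofs are below) =====
def Claim_equal_rotate_and_check : Prop := ∀ (block1 : List (List Int)) (block2 : List (List Int)), Dom_rotate_and_check block1 block2 → Pre_rotate_and_check block1 block2 → Spec_rotate_and_check block1 block2 (rotate_and_check block1 block2)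

-- ===== LEMMAS AND PROOFS =====

-- proof-side abbreviations
def pvProj (p : List Int) : Int × Int := (pvKey0 p, pvKey1 p)
def pvEmb (q : Int × Int) : List Int := [q.1, q.2]
def pvLexLe (a b : Int × Int) : Prop := a.1 < b.1 ∨ (a.1 = b.1 ∧ a.2 ≤ b.2)
def pvSort (ps : List (Int × Int)) : List (Int × Int) := PySem.List.sorted2 ps Prod.fst Prod.snd
def pvNorm (ps : List (Int × Int)) : List (Int × Int) :=
  (pvSort ps).map (fun q => (q.1 - ((pvSort ps).headD (0, 0)).1, q.2 - ((pvSort ps).headD (0, 0)).2))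
def pvRot (ps : List (Int × Int)) : List (Int × Int) := ps.map (fun q => (q.2, -q.1))
-- the comparison used inside sorted2 (Python's tuple '<')
def pvBB (a b : Int × Int) : Bool := decide (a.1 < b.1) || (!decide (b.1 < a.1) && decide (a.2 < b.2))
-- the relation A's two sorting passes produce, lifted from pvLexLe
def pvR (a b : List Int) : Prop := pvLexLe (pvProj a) (pvProj b)

-- pvLexLe is a total order
theorem pvLexLe_antisymm {a b : Int × Int} (h1 : pvLexLe a b) (h2 : pvLexLe b a) : a = b := by
  unfold pvLexLe at *
  have : a.1 = b.1 ∧ a.2 = b.2 := by omega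
  exact Prod.ext this.1 this.2

theorem pvLexLe_trans {a b c : Int × Int} (h1 : pvLexLe a b) (h2 : pvLexLe b c) : pvLexLe a c := by
  unfold pvLexLe at *; omega

-- insertBy unfolding
theorem pvInsertBy_nil {α : Type} (b : α → α → Bool) (x : α) : PySem.List.insertBy b x [] = [x] := rfl
theorem pvInsertBy_cons {α : Type} (b : α → α → Bool) (x y : α) (ys : List α) :
    PySem.List.insertBy b x (y :: ys) =
      if b x y then x :: y :: ys else y :: PySem.List.insertBy b x ys := rfl

-- inserting one element keeps Pairwise r, given how the comparison relates to r on members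
theorem pvPairwise_insertBy {α : Type} (r : α → α → Prop) (b : α → α → Bool) (x : α)
    (htrans : ∀ {c d e : α}, r c d → r d e → r c e) :
    ∀ acc : List α, acc.Pairwise r →
      (∀ a ∈ acc, b x a = false → r a x) →
      (∀ a ∈ acc, b x a = true → r x a) →
      (PySem.List.insertBy b x acc).Pairwise r := by
  intro acc
  induction acc with
  | nil => intro _ _ _; simp [pvInsertBy_nil]
  | cons y ys ih =>
    intro hpw h1 h2
    rw [pvInsertBy_cons]
    rcases List.pairwise_cons.mp hpw with ⟨hy, hys⟩
    by_cases hb : b x y = true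
    · simp only [hb, if_true]
      refine List.pairwise_cons.mpr ⟨?_, hpw⟩
      intro z hz
      rcases List.mem_cons.mp hz with rfl | hz
      · exact h2 z (by simp) hb
      · exact htrans (h2 y (by simp) hb) (hy z hz)
    · simp only [hb]
      refine List.pairwise_cons.mpr ⟨?_, ?_⟩
      · intro z hz
        rcases (PySem.List.mem_insertBy b x z ys).mp hz with hz | hz
        · subst hz; exact h1 y (by simp) (by simpa using hb)
        · exact hy z hz
      · exact ih hys (fun a ha hf => h1 a (by simp [ha]) hf)
          (fun a ha ht => h2 a (by simp [ha]) ht)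

-- B's sort: sorted2 with the tuple key is the insertBy fold with pvBB
theorem pvSort_eq_foldl (ps : List (Int × Int)) :
    pvSort ps = ps.foldl (fun acc x => PySem.List.insertBy pvBB x acc) [] := rfl

theorem pvSort_pairwise (ps : List (Int × Int)) : (pvSort ps).Pairwise pvLexLe := by
  rw [pvSort_eq_foldl]
  suffices h : ∀ (ls acc : List (Int × Int)), acc.Pairwise pvLexLe →
      (ls.foldl (fun acc x => PySem.List.insertBy pvBB x acc) acc).Pairwise pvLexLe by
    exact h ps [] (by simp)
  intro ls
  induction ls with
  | nil => intro acc h; simpa using h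
  | cons x ls ih =>
    intro acc hacc
    simp only [List.foldl_cons]
    refine ih _ ?_
    refine pvPairwise_insertBy pvLexLe pvBB x (fun h1 h2 => pvLexLe_trans h1 h2) acc hacc ?_ ?_
    · intro a _ hf
      unfold pvBB at hf
      simp at hf
      unfold pvLexLe
      omega
    · intro a _ ht
      unfold pvBB at ht
      simp at ht
      unfold pvLexLe
      omega

theorem pvSort_perm (ps : List (Int × Int)) : (pvSort ps).Perm ps :=
  PySem.List.sorted2_perm ps Prod.fst Prod.snd false

-- any pvLexLe-pairwise rearrangement of ps IS pvSort ps
theorem pvSort_unique {ps qs : List (Int × Int)} (hperm : qs.Perm ps)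
    (hpw : qs.Pairwise pvLexLe) : pvSort ps = qs := by
  refine List.eq_of_perm_of_sorted ?_ (pvSort_pairwise ps) hpw ((pvSort_perm ps).trans hperm.symm)
  intro a b _ _ h1 h2
  exact pvLexLe_antisymm h1 h2

theorem pvSort_congr_perm {ps qs : List (Int × Int)} (h : ps.Perm qs) : pvSort ps = pvSort qs :=
  pvSort_unique ((pvSort_perm qs).trans h.symm) (pvSort_pairwise qs)

theorem pvNorm_congr_perm {ps qs : List (Int × Int)} (h : ps.Perm qs) : pvNorm ps = pvNorm qs := by
  unfold pvNorm
  rw [pvSort_congr_perm h]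

theorem pvNorm_length (ps : List (Int × Int)) : (pvNorm ps).length = ps.length := by
  unfold pvNorm
  rw [List.length_map, (pvSort_perm ps).length_eq]

theorem pvRot_length (ps : List (Int × Int)) : (pvRot ps).length = ps.length := by
  simp [pvRot]

-- translation invariance
theorem pvSort_translate (t1 t2 : Int) (ps : List (Int × Int)) :
    pvSort (ps.map (fun q => (q.1 + t1, q.2 + t2))) =
      (pvSort ps).map (fun q => (q.1 + t1, q.2 + t2)) := by
  refine pvSort_unique ((pvSort_perm ps).map _) ?_
  refine List.Pairwise.map _ ?_ (pvSort_pairwise ps)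
  intro a b hab
  unfold pvLexLe at *
  simp only at *
  omega

theorem pvNorm_translate (t1 t2 : Int) (ps : List (Int × Int)) :
    pvNorm (ps.map (fun q => (q.1 + t1, q.2 + t2))) = pvNorm ps := by
  unfold pvNorm
  rw [pvSort_translate]
  cases h : pvSort ps with
  | nil => simp
  | cons h0 tl =>
    simp only [List.map_cons, List.headD_cons, List.map_map]
    congr 1
    · simp only [Prod.mk.injEq]
      constructor <;> ring
    · refine List.map_congr_left ?_
      intro q _
      simp only [Function.comp_apply, Prod.mk.injEq]
      constructor <;> ring

theorem pvRot_perm {ps qs : List (Int × Int)} (h : ps.Perm qs) : (pvRot ps).Perm (pvRot qs) :=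
  h.map _

theorem pvNorm_rot_congr {u v : List (Int × Int)} (h : u.Perm v) :
    pvNorm (pvRot u) = pvNorm (pvRot v) :=
  pvNorm_congr_perm (pvRot_perm h)

-- rotating a normalized list and renormalizing = normalizing the rotated list
theorem pvNorm_rot_norm (ps : List (Int × Int)) :
    pvNorm (pvRot (pvNorm ps)) = pvNorm (pvRot ps) := by
  cases h : pvSort ps with
  | nil =>
    have hnil : ps = [] := by
      have := (pvSort_perm ps).length_eq
      rw [h] at this
      exact List.eq_nil_of_length_eq_zero this.symm
    subst hnil
    rfl
  | cons h0 tl =>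
    have hn : pvNorm ps = (h0 :: tl).map (fun q => (q.1 - h0.1, q.2 - h0.2)) := by
      unfold pvNorm
      rw [h]
      simp only [List.headD_cons]
    have step1 : pvRot (pvNorm ps) = (pvRot (h0 :: tl)).map (fun q => (q.1 + -h0.2, q.2 + h0.1)) := by
      rw [hn]
      unfold pvRot
      simp only [List.map_map]
      refine List.map_congr_left ?_
      intro q _
      simp only [Function.comp_apply, Prod.mk.injEq]
      constructor <;> ring
    rw [step1, pvNorm_translate (-h0.2) h0.1 (pvRot (h0 :: tl))]
    exact pvNorm_rot_congr (h ▸ pvSort_perm ps)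

-- four rotations are the identity
theorem pvRot_four (ps : List (Int × Int)) : pvRot (pvRot (pvRot (pvRot ps))) = ps := by
  unfold pvRot
  simp only [List.map_map]
  have : ((fun q : Int × Int => (q.2, -q.1)) ∘ ((fun q : Int × Int => (q.2, -q.1)) ∘ ((fun q : Int × Int => (q.2, -q.1)) ∘ (fun q : Int × Int => (q.2, -q.1))))) = id := by
    funext q
    simp
  rw [this, List.map_id]

-- ----- A's arrange_block in terms of pvNorm -----

-- A's two stable sorting passes, projected to the first two coordinates, give pvSort (stability)
theorem pvTwoPass_map_proj (block : List (List Int)) :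
    (PySem.List.sorted (PySem.List.sorted block pvKey1) pvKey0).map pvProj =
      pvSort (block.map pvProj) := by
  symm
  apply pvSort_unique
  · refine List.Perm.map pvProj ?_
    exact (PySem.List.sorted_perm _ pvKey0 false).trans (PySem.List.sorted_perm _ pvKey1 false)
  · refine List.Pairwise.map pvProj (S := pvLexLe) (fun a b hab => hab) ?_
    have hinner : (PySem.List.sorted block pvKey1).Pairwise (fun a b => pvKey1 a ≤ pvKey1 b) :=
      PySem.List.sorted_pairwise block pvKey1
    rw [PySem.List.sorted_eq_foldl_insertBy]
    suffices h : ∀ (ls acc : List (List Int)), acc.Pairwise pvR →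
        ls.Pairwise (fun a b => pvKey1 a ≤ pvKey1 b) →
        (∀ a ∈ acc, ∀ c ∈ ls, pvKey1 a ≤ pvKey1 c) →
        (ls.foldl (fun acc x => PySem.List.insertBy (fun a b => decide (pvKey0 a < pvKey0 b)) x acc) acc).Pairwise pvR by
      exact h _ [] (by simp) hinner (by simp)
    intro ls
    induction ls with
    | nil => intro acc h _ _; simpa using h
    | cons x ls ih =>
      intro acc hacc hls hmem
      rcases List.pairwise_cons.mp hls with ⟨hx, hls'⟩
      simp only [List.foldl_cons]
      refine ih _ ?_ hls' ?_
      · refine pvPairwise_insertBy pvR _ x (fun h1 h2 => pvLexLe_trans h1 h2) acc hacc ?_ ?_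
        · intro a ha hf
          simp only [decide_eq_false_iff_not, not_lt] at hf
          have hk1 : pvKey1 a ≤ pvKey1 x := hmem a ha x (by simp)
          unfold pvR pvLexLe pvProj
          simp only
          omega
        · intro a _ ht
          simp only [decide_eq_true_eq] at ht
          unfold pvR pvLexLe pvProj
          simp only
          omega
      · intro a ha c hc
        rcases (PySem.List.mem_insertBy _ x a acc).mp ha with ha | ha
        · subst ha; exact hx c hc
        · exact hmem a ha c (by simp [hc])

theorem pvArrange_eq (block : List (List Int)) (hne : block ≠ []) :
    arrange_block block = (pvNorm (block.map pvProj)).map pvEmb := by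
  simp only [arrange_block, pvNorm]
  rw [← pvTwoPass_map_proj]
  cases hb : PySem.List.sorted (PySem.List.sorted block pvKey1) pvKey0 with
  | nil =>
    exfalso
    have hperm : (PySem.List.sorted (PySem.List.sorted block pvKey1) pvKey0).Perm block :=
      (PySem.List.sorted_perm _ pvKey0 false).trans (PySem.List.sorted_perm _ pvKey1 false)
    rw [hb] at hperm
    exact hne (hperm.symm.eq_nil)
  | cons h0 tl =>
    simp only [List.map_cons, List.headD_cons, List.map_map]
    congr 1

-- rotateA on an embedded list of pairs
theorem pvRotateA_emb (qs : List (Int × Int)) :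
    (qs.map pvEmb).map rotateA = (pvRot qs).map pvEmb := by
  unfold pvRot
  simp only [List.map_map]
  refine List.map_congr_left ?_
  intro q _
  rfl

theorem pvProj_emb (q : Int × Int) : pvProj (pvEmb q) = q := rfl
theorem pvKey0_emb (q : Int × Int) : pvKey0 (pvEmb q) = q.1 := rfl
theorem pvKey1_emb (q : Int × Int) : pvKey1 (pvEmb q) = q.2 := rfl

theorem pvArrange_emb (qs : List (Int × Int)) (hne : qs ≠ []) :
    arrange_block (qs.map pvEmb) = (pvNorm qs).map pvEmb := by
  rw [pvArrange_eq _ (by simpa using hne)]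
  congr 1
  refine pvNorm_congr_perm ?_
  rw [List.map_map]
  have h : (pvProj ∘ pvEmb) = id := funext pvProj_emb
  rw [h, List.map_id]

-- is_same on embedded lists of equal length is equality
theorem pvIsSame_emb (xs ys : List (Int × Int)) (hlen : xs.length = ys.length) :
    is_same (xs.map pvEmb) (ys.map pvEmb) = decide (xs = ys) := by
  rw [Bool.eq_iff_iff]
  unfold is_same
  rw [List.all_eq_true]
  simp only [PySem.List.len_eq, List.length_map, decide_eq_true_eq]
  constructor
  · intro h
    refine List.ext_getElem hlen ?_
    intro j hj1 hj2
    have hjmem : (j : Int) ∈ PySem.List.pyRange 0 (xs.length : Int) 1 := by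
      rw [PySem.List.mem_pyRange_one]
      constructor
      · exact_mod_cast Nat.zero_le j
      · exact_mod_cast hj1
    have hcond := h _ hjmem
    rw [PySem.List.pyGetD_natCast, PySem.List.pyGetD_natCast] at hcond
    rw [List.getD_eq_getElem _ _ (by simpa using hj1),
        List.getD_eq_getElem _ _ (by simpa using hj2)] at hcond
    simp only [List.getElem_map, pvKey0_emb, pvKey1_emb] at hcond
    simp only [Bool.not_eq_true', Bool.or_eq_false_iff, bne_eq_false_iff_eq] at hcond
    exact Prod.ext hcond.1 hcond.2
  · intro h i hi
    subst h
    simp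

-- ----- B's loop -----

theorem pvCanonLoop_succ (k : Nat) (pts : List (Int × Int)) (best : Option (List (Int × Int))) :
    pvCanonLoop (k + 1) pts best =
      pvCanonLoop k (pvRot (pvSort pts))
        (match best with
          | none => some (pvNorm pts)
          | some bst => if pvListLt (pvNorm pts) bst then some (pvNorm pts) else some bst) := rfl

-- pvListLt is a strict total order
theorem pvListLt_irrefl (a : List (Int × Int)) : pvListLt a a = false := by
  induction a with
  | nil => rfl
  | cons x xs ih => simp [pvListLt, ih]

theorem pvListLt_antisymm : ∀ (a b : List (Int × Int)),
    pvListLt a b = false → pvListLt b a = false → a = b := by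
  intro a
  induction a with
  | nil =>
    intro b h1 _
    cases b with
    | nil => rfl
    | cons y ys => simp [pvListLt] at h1
  | cons x xs ih =>
    intro b h1 h2
    cases b with
    | nil => simp [pvListLt] at h2
    | cons y ys =>
      by_cases hxy : x = y
      · subst hxy
        simp only [pvListLt] at h1 h2
        rw [ih ys h1 h2]
      · exfalso
        simp only [pvListLt, if_neg hxy, if_neg (Ne.symm hxy)] at h1 h2
        unfold pvPairLt at h1 h2
        simp only [Bool.or_eq_false_iff, Bool.and_eq_false_iff, decide_eq_false_iff_not,
          beq_eq_false_iff_ne, ne_eq] at h1 h2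
        apply hxy
        have : x.1 = y.1 ∧ x.2 = y.2 := by
          rcases h1 with ⟨h1a, h1b⟩
          rcases h2 with ⟨h2a, h2b⟩
          constructor <;> omega
        exact Prod.ext this.1 this.2

theorem pvListLt_trans : ∀ (a b c : List (Int × Int)),
    pvListLt a b = true → pvListLt b c = true → pvListLt a c = true := by
  intro a
  induction a with
  | nil =>
    intro b c h1 h2
    cases b with
    | nil => simp [pvListLt] at h1
    | cons y ys =>
      cases c with
      | nil => simp [pvListLt] at h2
      | cons z zs => rfl
  | cons x xs ih =>
    intro b c h1 h2
    cases b with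
    | nil => simp [pvListLt] at h1
    | cons y ys =>
      cases c with
      | nil => simp [pvListLt] at h2
      | cons z zs =>
        by_cases hxy : x = y <;> by_cases hyz : y = z
        · subst hxy; subst hyz
          simp only [pvListLt] at *
          exact ih ys zs h1 h2
        · subst hxy
          simp only [pvListLt, if_neg hyz] at *
          exact h2
        · subst hyz
          simp only [pvListLt, if_neg hxy] at *
          exact h1
        · simp only [pvListLt, if_neg hxy, if_neg hyz] at h1 h2
          unfold pvPairLt at h1 h2
          simp only [Bool.or_eq_true, Bool.and_eq_true, decide_eq_true_eq, beq_iff_eq] at h1 h2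
          by_cases hxz : x = z
          · exfalso
            subst hxz
            apply hxy
            have : x.1 = y.1 ∧ x.2 = y.2 := by constructor <;> omega
            exact Prod.ext this.1 this.2
          · simp only [pvListLt, if_neg hxz]
            unfold pvPairLt
            simp only [Bool.or_eq_true, Bool.and_eq_true, decide_eq_true_eq, beq_iff_eq]
            omega

theorem pvNotLt_trans {a b c : List (Int × Int)} (h1 : pvListLt a b = false)
    (h2 : pvListLt b c = false) : pvListLt a c = false := by
  by_contra h
  have hac : pvListLt a c = true := by simpa using h
  by_cases hcb : pvListLt c b = true
  · have := pvListLt_trans a c b hac hcb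
    rw [h1] at this
    exact absurd this (by simp)
  · have hbc : b = c := pvListLt_antisymm b c h2 (by simpa using hcb)
    subst hbc
    rw [h1] at hac
    exact absurd hac (by simp)

-- the running minimum under pvListLt
def pvMinL (a b : List (Int × Int)) : List (Int × Int) := if pvListLt b a then b else a

theorem pvMinL_mem (a b : List (Int × Int)) : pvMinL a b = a ∨ pvMinL a b = b := by
  unfold pvMinL; split_ifs <;> simp

theorem pvMinL_le_left (a b : List (Int × Int)) : pvListLt a (pvMinL a b) = false := by
  unfold pvMinL
  split_ifs with h
  · by_cases hab : pvListLt a b = true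
    · have := pvListLt_trans b a b h hab
      rw [pvListLt_irrefl] at this
      exact absurd this (by simp)
    · simpa using hab
  · exact pvListLt_irrefl a

theorem pvMinL_le_right (a b : List (Int × Int)) : pvListLt b (pvMinL a b) = false := by
  unfold pvMinL
  split_ifs with h
  · exact pvListLt_irrefl b
  · simpa using h

-- ----- assembling both sides -----

-- the canonical key of a block with projected points ps
def pvMin4 (ps : List (Int × Int)) : List (Int × Int) :=
  pvMinL (pvMinL (pvMinL (pvNorm ps) (pvNorm (pvRot ps))) (pvNorm (pvRot (pvRot ps))))
    (pvNorm (pvRot (pvRot (pvRot ps))))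

theorem pvNorm_rot_sort (u : List (Int × Int)) :
    pvNorm (pvRot (pvSort u)) = pvNorm (pvRot u) :=
  pvNorm_congr_perm (pvRot_perm (pvSort_perm u))

theorem pvCanonLoop_zero (pts : List (Int × Int)) (best : Option (List (Int × Int))) :
    pvCanonLoop 0 pts best = best := rfl

theorem pvCanonLoop_succ_none (k : Nat) (pts : List (Int × Int)) :
    pvCanonLoop (k + 1) pts none = pvCanonLoop k (pvRot (pvSort pts)) (some (pvNorm pts)) := rfl

theorem pvCanonLoop_succ_some (k : Nat) (pts : List (Int × Int)) (b : List (Int × Int)) :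
    pvCanonLoop (k + 1) pts (some b) =
      pvCanonLoop k (pvRot (pvSort pts)) (some (pvMinL b (pvNorm pts))) := by
  by_cases h : pvListLt (pvNorm pts) b = true <;>
    simp [pvCanonLoop_succ, pvMinL, h]

theorem pvCanon_eq (block : List (List Int)) :
    pvCanon block = some (pvMin4 (block.map pvProj)) := by
  have hmap : block.map (fun p => (PySem.List.pyGetD p 0 0, PySem.List.pyGetD p 1 0)) = block.map pvProj := rfl
  unfold pvCanon
  rw [hmap]
  set p := block.map pvProj with hp
  rw [show (4 : Nat) = 3 + 1 from rfl, pvCanonLoop_succ_none]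
  rw [show (3 : Nat) = 2 + 1 from rfl, pvCanonLoop_succ_some]
  rw [show (2 : Nat) = 1 + 1 from rfl, pvCanonLoop_succ_some]
  rw [show (1 : Nat) = 0 + 1 from rfl, pvCanonLoop_succ_some]
  rw [pvCanonLoop_zero]
  have e1 : pvNorm (pvRot (pvSort p)) = pvNorm (pvRot p) := pvNorm_rot_sort p
  have e2 : pvNorm (pvRot (pvSort (pvRot (pvSort p)))) = pvNorm (pvRot (pvRot p)) := by
    rw [pvNorm_rot_sort]
    exact pvNorm_rot_congr (pvRot_perm (pvSort_perm p))
  have e3 : pvNorm (pvRot (pvSort (pvRot (pvSort (pvRot (pvSort p)))))) = pvNorm (pvRot (pvRot (pvRot p))) := by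
    rw [pvNorm_rot_sort]
    refine pvNorm_rot_congr ?_
    exact (pvRot_perm (pvSort_perm _)).trans (pvRot_perm (pvRot_perm (pvSort_perm p)))
  rw [e2, e3, e1]
  rfl

-- membership-in-the-four-rotations predicate
def pvOrb (ps : List (Int × Int)) (x : List (Int × Int)) : Prop :=
  x = pvNorm ps ∨ x = pvNorm (pvRot ps) ∨ x = pvNorm (pvRot (pvRot ps)) ∨
    x = pvNorm (pvRot (pvRot (pvRot ps)))

theorem pvOrb_step {ps x : List (Int × Int)} (h : pvOrb ps x) : pvOrb ps (pvNorm (pvRot x)) := by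
  rcases h with h | h | h | h <;> subst h
  · right; left; rw [pvNorm_rot_norm]
  · right; right; left; rw [pvNorm_rot_norm]
  · right; right; right; rw [pvNorm_rot_norm]
  · left; rw [pvNorm_rot_norm, pvRot_four]

-- if the two orbits share an element, one is included in the other
theorem pvOrb_subset {ps qs x : List (Int × Int)} (hx : pvOrb ps x) (hx' : pvOrb qs x) :
    ∀ y, pvOrb qs y → pvOrb ps y := by
  have k1 : pvOrb ps (pvNorm (pvRot x)) := pvOrb_step hx
  have k2 : pvOrb ps (pvNorm (pvRot (pvNorm (pvRot x)))) := pvOrb_step k1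
  have k3 : pvOrb ps (pvNorm (pvRot (pvNorm (pvRot (pvNorm (pvRot x)))))) := pvOrb_step k2
  intro y hy
  rcases hx' with h | h | h | h <;> subst h <;>
    simp only [pvNorm_rot_norm, pvRot_four] at k1 k2 k3 <;>
    rcases hy with rfl | rfl | rfl | rfl <;>
    first
      | exact hx
      | exact k1
      | exact k2
      | exact k3

theorem pvMin4_mem (ps : List (Int × Int)) : pvOrb ps (pvMin4 ps) := by
  unfold pvMin4 pvOrb
  rcases pvMinL_mem (pvMinL (pvMinL (pvNorm ps) (pvNorm (pvRot ps))) (pvNorm (pvRot (pvRot ps)))) (pvNorm (pvRot (pvRot (pvRot ps)))) with h | h <;> rw [h]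
  · rcases pvMinL_mem (pvMinL (pvNorm ps) (pvNorm (pvRot ps))) (pvNorm (pvRot (pvRot ps))) with h2 | h2 <;> rw [h2]
    · rcases pvMinL_mem (pvNorm ps) (pvNorm (pvRot ps)) with h3 | h3 <;> rw [h3] <;> simp
    · simp
  · simp

theorem pvMin4_dominates (ps : List (Int × Int)) :
    ∀ x, pvOrb ps x → pvListLt x (pvMin4 ps) = false := by
  intro x hx
  unfold pvMin4
  set n0 := pvNorm ps
  set n1 := pvNorm (pvRot ps)
  set n2 := pvNorm (pvRot (pvRot ps))
  set n3 := pvNorm (pvRot (pvRot (pvRot ps)))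
  have hd0 : pvListLt n0 (pvMinL n0 n1) = false := pvMinL_le_left n0 n1
  have hd1 : pvListLt n1 (pvMinL n0 n1) = false := pvMinL_le_right n0 n1
  have hc : pvListLt (pvMinL n0 n1) (pvMinL (pvMinL n0 n1) n2) = false := pvMinL_le_left _ n2
  have hc2 : pvListLt n2 (pvMinL (pvMinL n0 n1) n2) = false := pvMinL_le_right _ n2
  have hm : pvListLt (pvMinL (pvMinL n0 n1) n2) (pvMinL (pvMinL (pvMinL n0 n1) n2) n3) = false := pvMinL_le_left _ n3
  have hm3 : pvListLt n3 (pvMinL (pvMinL (pvMinL n0 n1) n2) n3) = false := pvMinL_le_right _ n3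
  rcases hx with h | h | h | h <;> subst h
  · exact pvNotLt_trans (pvNotLt_trans hd0 hc) hm
  · exact pvNotLt_trans (pvNotLt_trans hd1 hc) hm
  · exact pvNotLt_trans hc2 hm
  · exact hm3

theorem pvMin4_eq_of_orb (ps qs : List (Int × Int))
    (hpq : ∀ y, pvOrb qs y → pvOrb ps y) (hqp : ∀ y, pvOrb ps y → pvOrb qs y) :
    pvMin4 ps = pvMin4 qs := by
  have h1 : pvListLt (pvMin4 ps) (pvMin4 qs) = false :=
    pvMin4_dominates qs _ (hqp _ (pvMin4_mem ps))
  have h2 : pvListLt (pvMin4 qs) (pvMin4 ps) = false :=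
    pvMin4_dominates ps _ (hpq _ (pvMin4_mem qs))
  exact pvListLt_antisymm _ _ h1 h2

-- unrolling A's loop (four iterations)
theorem pvLoop_four (b1 b2 : List (List Int)) :
    rotate_and_check_loop b1 4 b2 =
      (if is_same b1 b2 then true else
       if is_same b1 (arrange_block (b2.map rotateA)) then true else
       if is_same b1 (arrange_block ((arrange_block (b2.map rotateA)).map rotateA)) then true else
       if is_same b1 (arrange_block ((arrange_block ((arrange_block (b2.map rotateA)).map rotateA)).map rotateA)) then true else false) := rfl

-- the whole equivalence (the ports are total and agree on every input; Pre_ matters only for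
-- fidelity to the Python originals, which raise outside it)
theorem pvMain (block1 block2 : List (List Int)) :
    rotate_and_check block1 block2 = rotate_and_check_alt block1 block2 := by
  by_cases hl : block1.length = block2.length
  · by_cases hnil : block1 = []
    · have h2 : block2 = [] := by
        subst hnil
        exact List.eq_nil_of_length_eq_zero hl.symm
      subst hnil; subst h2
      decide
    · unfold rotate_and_check rotate_and_check_alt
      simp only [hl, ne_eq, not_true_eq_false, if_false]
      have hne1 : block1 ≠ [] := hnil
      have neOfLen : ∀ {l : List (Int × Int)}, 0 < l.length → l ≠ [] := by
        intro l h hnil'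
        subst hnil'
        simp at h
      have hlen1 : 0 < block1.length := List.length_pos_of_ne_nil hne1
      have hne2 : block2 ≠ [] := by
        intro h
        subst h
        rw [List.length_nil] at hl
        omega
      set p := block1.map pvProj with hp
      set q := block2.map pvProj with hq
      have hplen : p.length = block1.length := by simp [hp]
      have hqlen : q.length = block2.length := by simp [hq]
      have hpl : 0 < p.length := by omega
      have hql : 0 < q.length := by omega
      rw [pvArrange_eq block1 hne1, pvArrange_eq block2 hne2]
      rw [← hp, ← hq]
      have hN1 : pvNorm (pvRot (pvNorm q)) = pvNorm (pvRot q) := pvNorm_rot_norm q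
      have hN2 : pvNorm (pvRot (pvNorm (pvRot q))) = pvNorm (pvRot (pvRot q)) := pvNorm_rot_norm (pvRot q)
      have hN3 : pvNorm (pvRot (pvNorm (pvRot (pvRot q)))) = pvNorm (pvRot (pvRot (pvRot q))) := pvNorm_rot_norm (pvRot (pvRot q))
      have hlen0 : (pvNorm p).length = (pvNorm q).length := by
        rw [pvNorm_length, pvNorm_length]; omega
      have hlen1' : (pvNorm p).length = (pvNorm (pvRot q)).length := by
        rw [pvNorm_length, pvNorm_length, pvRot_length]; omega
      have hlen2' : (pvNorm p).length = (pvNorm (pvRot (pvRot q))).length := by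
        rw [pvNorm_length, pvNorm_length, pvRot_length, pvRot_length]; omega
      have hlen3' : (pvNorm p).length = (pvNorm (pvRot (pvRot (pvRot q)))).length := by
        rw [pvNorm_length, pvNorm_length, pvRot_length, pvRot_length, pvRot_length]; omega
      rw [pvLoop_four]
      rw [pvRotateA_emb (pvNorm q),
          pvArrange_emb (pvRot (pvNorm q)) (neOfLen (by rw [pvRot_length, pvNorm_length]; omega)), hN1]
      rw [pvRotateA_emb (pvNorm (pvRot q)),
          pvArrange_emb (pvRot (pvNorm (pvRot q))) (neOfLen (by rw [pvRot_length, pvNorm_length, pvRot_length]; omega)), hN2]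
      rw [pvRotateA_emb (pvNorm (pvRot (pvRot q))),
          pvArrange_emb (pvRot (pvNorm (pvRot (pvRot q)))) (neOfLen (by rw [pvRot_length, pvNorm_length, pvRot_length, pvRot_length]; omega)), hN3]
      rw [pvIsSame_emb _ _ hlen0, pvIsSame_emb _ _ hlen1', pvIsSame_emb _ _ hlen2', pvIsSame_emb _ _ hlen3']
      rw [pvCanon_eq block1, pvCanon_eq block2, ← hp, ← hq]
      have key : (pvNorm p = pvNorm q ∨ pvNorm p = pvNorm (pvRot q) ∨ pvNorm p = pvNorm (pvRot (pvRot q)) ∨ pvNorm p = pvNorm (pvRot (pvRot (pvRot q)))) ↔ pvMin4 p = pvMin4 q := by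
        constructor
        · intro h
          have hx : pvOrb p (pvNorm p) := Or.inl rfl
          have hx' : pvOrb q (pvNorm p) := h
          exact pvMin4_eq_of_orb p q (pvOrb_subset hx hx') (pvOrb_subset hx' hx)
        · intro h
          have hm1 : pvOrb p (pvMin4 p) := pvMin4_mem p
          have hm2 : pvOrb q (pvMin4 p) := by rw [h]; exact pvMin4_mem q
          exact pvOrb_subset hm2 hm1 (pvNorm p) (Or.inl rfl)
      simp only [decide_eq_true_eq]
      split_ifs with h0 h1 h2 h3
      · symm
        simp only [beq_iff_eq, Option.some.injEq]
        exact key.mp (Or.inl h0)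
      · symm
        simp only [beq_iff_eq, Option.some.injEq]
        exact key.mp (Or.inr (Or.inl h1))
      · symm
        simp only [beq_iff_eq, Option.some.injEq]
        exact key.mp (Or.inr (Or.inr (Or.inl h2)))
      · symm
        simp only [beq_iff_eq, Option.some.injEq]
        exact key.mp (Or.inr (Or.inr (Or.inr h3)))
      · symm
        simp only [beq_eq_false_iff_ne, ne_eq, Option.some.injEq]
        intro hmin
        rcases key.mpr hmin with h | h | h | h <;> contradiction
  · unfold rotate_and_check rotate_and_check_alt
    simp [hl]

-- ===== VERDICT (by name: the statement is the Claim_ definition above) =====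
theorem rotate_and_check_spec : Claim_equal_rotate_and_check := by
  intro block1 block2 _ _
  unfold Spec_rotate_and_check
  exact pvMain block1 block2
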